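-- pv_equiv track=rewrite | github.com/saibhavanathirthala/mypeer | langgraph_pipeline.py | _generate_todos_from_request
-- ===== SOURCE A (Python) =====
-- from typing import TypedDict, Optional, List
--
-- def _generate_todos_from_request(request: str) -> List[str]:
--     """Generate focused interactive todos from user request - Simplified for better interaction"""
--     # Simplified todo generation for better user interaction
--     todos = []
--     request_lower = request.lower()
--
--     # Always start with file creation
--     todos.append("Create a new file with appropriate name and extension")
--
--     # Function-specific todos (simplified)
--     if "function" in request_lower:
--         todos.append("Create the main function with proper parameters")
--         todos.append("Implement the function logic")
--
--     # Class-specific todos (simplified)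
--     elif "class" in request_lower:
--         todos.append("Define the class structure and constructor")
--         todos.append("Implement class methods")
--
--     # API-specific todos (simplified)
--     elif any(word in request_lower for word in ["api", "endpoint", "rest", "http"]):
--         todos.append("Set up the API framework")
--         todos.append("Create the endpoint structure")
--
--     # Database-specific todos (simplified)
--     elif any(word in request_lower for word in ["database", "model", "schema", "table"]):
--         todos.append("Design the database schema")
--         todos.append("Create the database model")
--
--     # Test-specific todos (simplified)
--     elif "test" in request_lower:
--         todos.append("Create test cases")
--         todos.append("Implement test logic")
--
--     # Web-specific todos (simplified)
--     elif any(word in request_lower for word in ["web", "html", "css", "frontend"]):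
--         todos.append("Create HTML structure")
--         todos.append("Add CSS styling")
--
--     # Default todos for simple requests
--     else:
--         todos.append("Implement the requested functionality")
--         todos.append("Add proper documentation and comments")
--
--     return todos
-- ===== SOURCE B (Python) =====
-- def _generate_todos_from_request(request: str):
--     """Generate focused interactive todos: min-priority over all keyword hits."""
--     request_lower = request.lower()
--     # flat keyword -> priority map (lower number = higher priority)
--     keyword_priority = [
--         ("function", 0),
--         ("class", 1),
--         ("api", 2), ("endpoint", 2), ("rest", 2), ("http", 2),
--         ("database", 3), ("model", 3), ("schema", 3), ("table", 3),
--         ("test", 4),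
--         ("web", 5), ("html", 5), ("css", 5), ("frontend", 5),
--     ]
--     extras = [
--         ["Create the main function with proper parameters",
--          "Implement the function logic"],
--         ["Define the class structure and constructor",
--          "Implement class methods"],
--         ["Set up the API framework",
--          "Create the endpoint structure"],
--         ["Design the database schema",
--          "Create the database model"],
--         ["Create test cases",
--          "Implement test logic"],
--         ["Create HTML structure",
--          "Add CSS styling"],
--         ["Implement the requested functionality",
--          "Add proper documentation and comments"],
--     ]
--     best = 6  # sentinel priority: the default todos
--     for keyword, priority in keyword_priority:
--         if keyword in request_lower and priority < best:
--             best = priority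
--     return ["Create a new file with appropriate name and extension"] + extras[best]
-- ===== Notes on version B (the rewrite author's own statement) =====
-- stated objective: alternative
-- what changed: Instead of A's ordered first-match if/elif chain over keyword groups, B scans a flat keyword-to-priority map once keeping a running minimum priority, then indexes a todo table by that minimum (sentinel = default todos).
import Mathlib
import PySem

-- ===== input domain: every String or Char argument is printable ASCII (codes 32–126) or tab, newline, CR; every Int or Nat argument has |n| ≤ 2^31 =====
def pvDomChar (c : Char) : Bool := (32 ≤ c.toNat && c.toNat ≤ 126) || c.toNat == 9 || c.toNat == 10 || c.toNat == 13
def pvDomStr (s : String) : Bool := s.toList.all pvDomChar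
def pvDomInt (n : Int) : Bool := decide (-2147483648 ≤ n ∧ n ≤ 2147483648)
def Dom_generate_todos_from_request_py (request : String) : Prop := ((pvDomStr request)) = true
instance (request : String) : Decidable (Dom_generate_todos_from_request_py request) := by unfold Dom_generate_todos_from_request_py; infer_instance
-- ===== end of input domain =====

-- B replaces A's first-match if/elif chain by a running-minimum priority over a flat keyword map (objective: alternative).

-- ===== PORT A =====
-- Literal port of A's if/elif chain of appends.
def generate_todos_from_request_py (request : String) : List String :=
  let request_lower := PySem.Str.lower request
  let todos : List String := []
  let todos := todos ++ ["Create a new file with appropriate name and extension"]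
  let todos :=
    if PySem.Str.isIn "function" request_lower then
      todos ++ ["Create the main function with proper parameters",
                "Implement the function logic"]
    else if PySem.Str.isIn "class" request_lower then
      todos ++ ["Define the class structure and constructor",
                "Implement class methods"]
    else if (["api", "endpoint", "rest", "http"].any
              (fun word => PySem.Str.isIn word request_lower)) then
      todos ++ ["Set up the API framework",
                "Create the endpoint structure"]
    else if (["database", "model", "schema", "table"].any
              (fun word => PySem.Str.isIn word request_lower)) then
      todos ++ ["Design the database schema",
                "Create the database model"]
    else if PySem.Str.isIn "test" request_lower then
      todos ++ ["Create test cases",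
                "Implement test logic"]
    else if (["web", "html", "css", "frontend"].any
              (fun word => PySem.Str.isIn word request_lower)) then
      todos ++ ["Create HTML structure",
                "Add CSS styling"]
    else
      todos ++ ["Implement the requested functionality",
                "Add proper documentation and comments"]
  todos

-- ===== PORT B =====
-- Literal port of B: one pass over a flat keyword→priority map keeping the minimum
-- matched priority (sentinel 6 = default), then index the extras table by it.
def pvKeywordPriority : List (String × Nat) :=
  [("function", 0),
   ("class", 1),
   ("api", 2), ("endpoint", 2), ("rest", 2), ("http", 2),
   ("database", 3), ("model", 3), ("schema", 3), ("table", 3),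
   ("test", 4),
   ("web", 5), ("html", 5), ("css", 5), ("frontend", 5)]

def pvExtras : List (List String) :=
  [ ["Create the main function with proper parameters",
     "Implement the function logic"],
    ["Define the class structure and constructor",
     "Implement class methods"],
    ["Set up the API framework",
     "Create the endpoint structure"],
    ["Design the database schema",
     "Create the database model"],
    ["Create test cases",
     "Implement test logic"],
    ["Create HTML structure",
     "Add CSS styling"],
    ["Implement the requested functionality",
     "Add proper documentation and comments"] ]

def generate_todos_from_request_py_alt (request : String) : List String :=
  let request_lower := PySem.Str.lower request
  let best := pvKeywordPriority.foldl
    (fun best kp =>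
      if PySem.Str.isIn kp.1 request_lower ∧ kp.2 < best then kp.2 else best) 6
  ["Create a new file with appropriate name and extension"] ++ pvExtras.getD best []

-- ===== PRECONDITION & SPEC =====
def Spec_generate_todos_from_request_py (request : String) (out : List String) : Prop := out = generate_todos_from_request_py_alt request
instance (request : String) (out : List String) : Decidable (Spec_generate_todos_from_request_py request out) := by unfold Spec_generate_todos_from_request_py; infer_instance

-- ===== CLAIM (what is proved, stated in full; the proofs are below) =====
def Claim_equal_generate_todos_from_request_py : Prop := ∀ (request : String), Dom_generate_todos_from_request_py request → Spec_generate_todos_from_request_py request (generate_todos_from_request_py request)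

-- ===== LEMMAS AND PROOFS =====

-- A's chain as an index into pvExtras (proof helper only).
def pvIdxA (c1 c2 c3 c4 c5 c6 : Bool) : Nat :=
  if c1 then 0 else if c2 then 1 else if c3 then 2 else if c4 then 3
  else if c5 then 4 else if c6 then 5 else 6

theorem pvA_char (request : String) :
    generate_todos_from_request_py request =
      ["Create a new file with appropriate name and extension"] ++
        pvExtras.getD
          (pvIdxA (PySem.Str.isIn "function" (PySem.Str.lower request))
                  (PySem.Str.isIn "class" (PySem.Str.lower request))
                  (["api", "endpoint", "rest", "http"].any
                    (fun word => PySem.Str.isIn word (PySem.Str.lower request)))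
                  (["database", "model", "schema", "table"].any
                    (fun word => PySem.Str.isIn word (PySem.Str.lower request)))
                  (PySem.Str.isIn "test" (PySem.Str.lower request))
                  (["web", "html", "css", "frontend"].any
                    (fun word => PySem.Str.isIn word (PySem.Str.lower request)))) [] := by
  simp only [generate_todos_from_request_py, pvIdxA, pvExtras]
  split_ifs <;> rfl

-- A fold that can only lower the accumulator stops once every remaining priority is ≥ it.
theorem pvFold_stop (P : String → Bool) (l : List (String × Nat)) (a : Nat)
    (h : ∀ x ∈ l, a ≤ x.2) :
    l.foldl (fun best kp => if P kp.1 ∧ kp.2 < best then kp.2 else best) a = a := by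
  induction l with
  | nil => rfl
  | cons x l ih =>
    have hx : ¬ (P x.1 = true ∧ x.2 < a) := by
      rintro ⟨-, hlt⟩
      exact absurd (h x (List.mem_cons_self)) (by omega)
    simp only [List.foldl, if_neg hx]
    exact ih (fun y hy => h y (List.mem_cons_of_mem _ hy))

-- Over a priority-nondecreasing list whose priorities are all below the start value,
-- the running-minimum fold returns the priority of the FIRST matching entry.
theorem pvFold_find (P : String → Bool) (l : List (String × Nat)) (a : Nat)
    (hs : l.Pairwise (fun x y => x.2 ≤ y.2)) (ha : ∀ x ∈ l, x.2 < a) :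
    l.foldl (fun best kp => if P kp.1 ∧ kp.2 < best then kp.2 else best) a =
      (match l.find? (fun x => P x.1) with | some x => x.2 | none => a) := by
  induction l generalizing a with
  | nil => rfl
  | cons x l ih =>
    by_cases hP : P x.1 = true
    · have hfind : (x :: l).find? (fun y => P y.1) = some x :=
        List.find?_cons_of_pos (by simpa using hP)
      have hcond : P x.1 = true ∧ x.2 < a := ⟨hP, ha x List.mem_cons_self⟩
      rw [List.foldl_cons, if_pos hcond, hfind]
      exact pvFold_stop P l x.2 (fun y hy => (List.pairwise_cons.mp hs).1 y hy)
    · have hfind : (x :: l).find? (fun y => P y.1) = l.find? (fun y => P y.1) :=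
        List.find?_cons_of_neg (by simpa using hP)
      have hcond : ¬ (P x.1 = true ∧ x.2 < a) := fun h => hP h.1
      rw [List.foldl_cons, if_neg hcond, hfind]
      apply ih
      · exact (List.pairwise_cons.mp hs).2
      · exact fun y hy => ha y (List.mem_cons_of_mem _ hy)

theorem pvIdx_eq (rl : String) :
    pvKeywordPriority.foldl
      (fun best kp =>
        if PySem.Str.isIn kp.1 rl ∧ kp.2 < best then kp.2 else best) 6 =
    pvIdxA (PySem.Str.isIn "function" rl)
           (PySem.Str.isIn "class" rl)
           (["api", "endpoint", "rest", "http"].any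
             (fun word => PySem.Str.isIn word rl))
           (["database", "model", "schema", "table"].any
             (fun word => PySem.Str.isIn word rl))
           (PySem.Str.isIn "test" rl)
           (["web", "html", "css", "frontend"].any
             (fun word => PySem.Str.isIn word rl)) := by
  rw [pvFold_find (fun w => PySem.Str.isIn w rl) pvKeywordPriority 6
        (by simp [pvKeywordPriority]) (by simp [pvKeywordPriority])]
  simp only [pvKeywordPriority, List.find?, List.any_cons, List.any_nil, Bool.or_false]
  by_cases h1 : PySem.Str.isIn "function" rl = true
  · simp_all [pvIdxA]
  by_cases h2 : PySem.Str.isIn "class" rl = true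
  · simp_all [pvIdxA]
  by_cases h3 : PySem.Str.isIn "api" rl = true
  · simp_all [pvIdxA]
  by_cases h4 : PySem.Str.isIn "endpoint" rl = true
  · simp_all [pvIdxA]
  by_cases h5 : PySem.Str.isIn "rest" rl = true
  · simp_all [pvIdxA]
  by_cases h6 : PySem.Str.isIn "http" rl = true
  · simp_all [pvIdxA]
  by_cases h7 : PySem.Str.isIn "database" rl = true
  · simp_all [pvIdxA]
  by_cases h8 : PySem.Str.isIn "model" rl = true
  · simp_all [pvIdxA]
  by_cases h9 : PySem.Str.isIn "schema" rl = true
  · simp_all [pvIdxA]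
  by_cases h10 : PySem.Str.isIn "table" rl = true
  · simp_all [pvIdxA]
  by_cases h11 : PySem.Str.isIn "test" rl = true
  · simp_all [pvIdxA]
  by_cases h12 : PySem.Str.isIn "web" rl = true
  · simp_all [pvIdxA]
  by_cases h13 : PySem.Str.isIn "html" rl = true
  · simp_all [pvIdxA]
  by_cases h14 : PySem.Str.isIn "css" rl = true
  · simp_all [pvIdxA]
  by_cases h15 : PySem.Str.isIn "frontend" rl = true
  · simp_all [pvIdxA]
  simp_all [pvIdxA]

-- ===== VERDICT (by name: the statement is the Claim_ definition above) =====
theorem generate_todos_from_request_py_spec : Claim_equal_generate_todos_from_request_py := by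
  intro request _
  show _ = _
  rw [pvA_char]
  simp only [generate_todos_from_request_py_alt, pvIdx_eq]
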